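-- pv_equiv track=rewrite | github.com/Asimok/DROP | tools/drop_utils.py | find_valid_spans
-- ===== SOURCE A (Python) =====
-- import string
-- from collections import defaultdict
--
-- STRIPPED_CHARACTERS = string.punctuation + "".join(["‘", "’", "´", "`", "_"])
--
-- IGNORED_TOKENS = {"a", "an", "the"}
--
-- def find_valid_spans(passage_tokens, answer_texts):
--     # answer texts = tokenized and recomposed answer texts
--     normalized_tokens = [
--         token.lower().strip(STRIPPED_CHARACTERS) for token in passage_tokens
--     ]
--     word_positions = defaultdict(list)  # ?
--     for i, token in enumerate(normalized_tokens):
--         word_positions[token].append(i)  # dict telling index at which appears each word in the passage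
--
--     spans = []
--     for answer_text in answer_texts:
--         answer_tokens = answer_text.lower().strip(STRIPPED_CHARACTERS).split()
--         num_answer_tokens = len(answer_tokens)
--         if answer_tokens[0] not in word_positions:
--             continue
--         for span_start in word_positions[answer_tokens[0]]:
--             span_end = span_start  # span_end is _inclusive_
--             answer_index = 1
--             while answer_index < num_answer_tokens and span_end + 1 < len(normalized_tokens):
--                 token = normalized_tokens[span_end + 1]
--                 if answer_tokens[answer_index].strip(STRIPPED_CHARACTERS) == token:
--                     answer_index += 1
--                     span_end += 1
--                 elif token in IGNORED_TOKENS: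
--                     span_end += 1
--                 else:
--                     break
--             if num_answer_tokens == answer_index:
--                 spans.append((span_start, span_end))
--     return spans  # list of all matching passage slices
-- ===== SOURCE B (Python) =====
-- import string
--
-- STRIPPED_CHARACTERS = string.punctuation + "".join(["‘", "’", "´", "`", "_"])
--
-- IGNORED_TOKENS = {"a", "an", "the"}
--
--
-- def _match_end(tokens, n, end, rest):
--     # end = index of the last matched passage token; rest = remaining (stripped) answer tokens.
--     while rest:
--         nxt = end + 1
--         if nxt >= n:
--             return None
--         t = tokens[nxt]
--         if t == rest[0]:
--             rest = rest[1:]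
--         elif t not in IGNORED_TOKENS:
--             return None
--         end = nxt
--     return end
--
--
-- def find_valid_spans(passage_tokens, answer_texts):
--     tokens = [t.lower().strip(STRIPPED_CHARACTERS) for t in passage_tokens]
--     n = len(tokens)
--     spans = []
--     for answer_text in answer_texts:
--         answer_tokens = answer_text.lower().strip(STRIPPED_CHARACTERS).split()
--         first = answer_tokens[0]
--         rest = [t.strip(STRIPPED_CHARACTERS) for t in answer_tokens[1:]]
--         for start, tok in enumerate(tokens):
--             if tok == first:
--                 end = _match_end(tokens, n, start, rest)
--                 if end is not None:
--                     spans.append((start, end))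
--     return spans
-- ===== Notes on version B (the rewrite author's own statement) =====
-- stated objective: simpler
-- what changed: Drops the word_positions defaultdict index entirely: B scans the passage once per answer for tokens equal to the first answer token, pre-strips the remaining answer tokens once, and replaces the mutable while-loop matcher by a recursive Option-returning matcher that consumes the remaining token list.
import Mathlib
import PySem

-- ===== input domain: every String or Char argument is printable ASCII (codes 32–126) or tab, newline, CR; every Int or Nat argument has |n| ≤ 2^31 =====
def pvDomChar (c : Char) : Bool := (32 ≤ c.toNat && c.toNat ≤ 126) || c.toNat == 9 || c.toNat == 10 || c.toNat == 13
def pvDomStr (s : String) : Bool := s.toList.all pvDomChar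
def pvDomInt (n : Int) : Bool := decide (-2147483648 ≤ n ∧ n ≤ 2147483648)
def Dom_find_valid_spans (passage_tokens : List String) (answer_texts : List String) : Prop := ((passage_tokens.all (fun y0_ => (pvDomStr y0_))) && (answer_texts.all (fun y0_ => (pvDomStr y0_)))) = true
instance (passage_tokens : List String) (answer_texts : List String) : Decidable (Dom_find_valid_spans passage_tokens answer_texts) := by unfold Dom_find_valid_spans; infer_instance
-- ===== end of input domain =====

-- B drops A's word_positions defaultdict index: it scans the passage directly for first-token
-- matches and replaces the mutable while-loop by a recursive Option-returning matcher (objective: simpler).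


-- module constants shared by both Pythons (STRIPPED_CHARACTERS, IGNORED_TOKENS)
def pvStripped : String := "!\"#$%&'()*+,-./:;<=>?@[\\]^_`{|}~‘’´`_"
def pvIgnored : PySem.Set String := PySem.Set.ofList ["a", "an", "the"]
-- token.lower().strip(STRIPPED_CHARACTERS)
def pvNorm (t : String) : String := PySem.Str.stripChars (PySem.Str.lower t) pvStripped

-- ===== PORT A =====
-- the inner while-loop of A: state (span_end, answer_index)
def pvALoop (normalized : List String) (ansTokens : List String) (span_end : Nat) (answer_index : Nat) : Nat × Nat :=
  if h : answer_index < ansTokens.length ∧ span_end + 1 < normalized.length then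
    let token := normalized.getD (span_end + 1) ""
    if PySem.Str.stripChars (ansTokens.getD answer_index "") pvStripped == token then
      pvALoop normalized ansTokens (span_end + 1) (answer_index + 1)
    else if pvIgnored.contains token then
      pvALoop normalized ansTokens (span_end + 1) answer_index
    else (span_end, answer_index)
  else (span_end, answer_index)
termination_by normalized.length - span_end
decreasing_by all_goals omega

-- word_positions = defaultdict(list); for i, token in enumerate(normalized): word_positions[token].append(i)
def pvBuildWP (normalized : List String) : PySem.Dict String (List Int) :=
  (PySem.List.enumerate normalized 0).foldl
    (fun d p => d.modify p.2 [] (fun v => v ++ [p.1])) PySem.Dict.empty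

def find_valid_spans (passage_tokens : List String) (answer_texts : List String) : List (Int × Int) :=
  let normalized := passage_tokens.map pvNorm
  let wp := pvBuildWP normalized
  answer_texts.foldl (fun spans answer_text =>
    let answer_tokens := PySem.Str.split₀ (PySem.Str.stripChars (PySem.Str.lower answer_text) pvStripped)
    let num := answer_tokens.length
    match answer_tokens with
    | [] => spans  -- Python raises IndexError at answer_tokens[0]; excluded by Pre_
    | a0 :: _ =>
      if wp.contains a0 then
        (wp.getD a0 []).foldl (fun acc span_start =>
          let r := pvALoop normalized answer_tokens span_start.toNat 1
          if num == r.2 then acc ++ [(span_start, (r.1 : Int))] else acc) spans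
      else spans) []

-- ===== PORT B =====
-- B's recursive matcher: end = last matched index, rest = remaining stripped answer tokens
def pvMatchEnd (tokens : List String) (n : Nat) (e : Nat) (rest : List String) : Option Nat :=
  match rest with
  | [] => some e
  | r0 :: rtl =>
    if h : e + 1 < n then
      let t := tokens.getD (e + 1) ""
      if t == r0 then pvMatchEnd tokens n (e + 1) rtl
      else if pvIgnored.contains t then pvMatchEnd tokens n (e + 1) (r0 :: rtl)
      else none
    else none
termination_by n - e
decreasing_by all_goals omega

def find_valid_spans_alt (passage_tokens : List String) (answer_texts : List String) : List (Int × Int) :=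
  let tokens := passage_tokens.map pvNorm
  let n := tokens.length
  answer_texts.foldl (fun spans answer_text =>
    match PySem.Str.split₀ (PySem.Str.stripChars (PySem.Str.lower answer_text) pvStripped) with
    | [] => spans  -- Python raises IndexError at answer_tokens[0]; excluded by Pre_
    | first :: tl =>
      let rest := tl.map (fun t => PySem.Str.stripChars t pvStripped)
      (PySem.List.enumerate tokens 0).foldl (fun acc p =>
        if p.2 == first then
          match pvMatchEnd tokens n p.1.toNat rest with
          | some e => acc ++ [(p.1, (e : Int))]
          | none => acc
        else acc) spans) []

-- ===== PRECONDITION & SPEC =====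
-- Pre_ excludes exactly the inputs where some answer text normalizes to no tokens: there the
-- Python A (and B) raise IndexError at answer_tokens[0].
def Pre_find_valid_spans (passage_tokens : List String) (answer_texts : List String) : Prop :=
  ∀ t ∈ answer_texts, PySem.Str.split₀ (PySem.Str.stripChars (PySem.Str.lower t) pvStripped) ≠ []
instance (passage_tokens : List String) (answer_texts : List String) : Decidable (Pre_find_valid_spans passage_tokens answer_texts) := by unfold Pre_find_valid_spans; infer_instance
def pvWitness_find_valid_spans : List String × List String := (["The", "big", "cat!"], ["a big cat", "dog"])
def Spec_find_valid_spans (passage_tokens : List String) (answer_texts : List String) (out : List (Int × Int)) : Prop := out = find_valid_spans_alt passage_tokens answer_texts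
instance (passage_tokens : List String) (answer_texts : List String) (out : List (Int × Int)) : Decidable (Spec_find_valid_spans passage_tokens answer_texts out) := by unfold Spec_find_valid_spans; infer_instance

-- ===== CLAIM (what is proved, stated in full; the proofs are below) =====
def Claim_equal_find_valid_spans : Prop := ∀ (passage_tokens : List String) (answer_texts : List String), Dom_find_valid_spans passage_tokens answer_texts → Pre_find_valid_spans passage_tokens answer_texts → Spec_find_valid_spans passage_tokens answer_texts (find_valid_spans passage_tokens answer_texts)

-- ===== LEMMAS AND PROOFS =====

-- positions of key k in the enumerated token list
def pvPos (l : List String) (k : String) : List Int :=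
  (PySem.List.enumerate l 0).filterMap (fun p => if p.2 == k then some p.1 else none)

theorem pvBuildWP_general (k : String) : ∀ (l : List (Int × String)) (d : PySem.Dict String (List Int)),
    (l.foldl (fun d p => d.modify p.2 [] (fun v => v ++ [p.1])) d).getD k [] =
      d.getD k [] ++ l.filterMap (fun p => if p.2 == k then some p.1 else none) := by
  intro l
  induction l with
  | nil => simp
  | cons p tl ih =>
    intro d
    simp only [List.foldl_cons, List.filterMap_cons, ih]
    rw [PySem.Dict.getD_modify]
    by_cases hk : k = p.2
    · simp [hk, List.append_assoc]
    · simp [hk, beq_eq_false_iff_ne.mpr (fun h => hk h.symm)]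

theorem pvBuildWP_contains (k : String) : ∀ (l : List (Int × String)) (d : PySem.Dict String (List Int)),
    (l.foldl (fun d p => d.modify p.2 [] (fun v => v ++ [p.1])) d).contains k =
      (d.contains k || l.any (fun p => p.2 == k)) := by
  intro l
  induction l with
  | nil => simp
  | cons p tl ih =>
    intro d
    simp only [List.foldl_cons, List.any_cons, ih, PySem.Dict.contains_modify]
    by_cases hk : k = p.2
    · simp [hk]
    · simp [beq_eq_false_iff_ne.mpr hk, beq_eq_false_iff_ne.mpr (fun h => hk h.symm)]

theorem pvWP_getD (l : List String) (k : String) :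
    (pvBuildWP l).getD k [] = pvPos l k := by
  unfold pvBuildWP pvPos
  rw [pvBuildWP_general]
  simp

theorem pvWP_not_contains (l : List String) (k : String)
    (h : (pvBuildWP l).contains k = false) : pvPos l k = [] := by
  unfold pvBuildWP at h
  rw [pvBuildWP_contains] at h
  simp only [PySem.Dict.contains_empty, Bool.false_or, List.any_eq_false] at h
  unfold pvPos
  rw [List.filterMap_eq_nil_iff]
  intro p hp
  simp [h p hp]

-- core inner-loop correspondence: B's recursive matcher computes exactly the success test
-- A applies to the final state of its while-loop
theorem pvMatch_eq_loop (tokens L : List String) :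
    ∀ (e ai : Nat), ai ≤ L.length →
      pvMatchEnd tokens tokens.length e ((L.drop ai).map (fun t => PySem.Str.stripChars t pvStripped)) =
        (if (pvALoop tokens L e ai).2 = L.length then some (pvALoop tokens L e ai).1 else none) := by
  intro e ai
  induction e, ai using pvALoop.induct tokens L with
  | case1 e ai h tok heq ih =>
    intro _
    obtain ⟨hai, he⟩ := h
    simp only [show tok = tokens.getD (e + 1) "" from rfl] at heq
    have hstep : pvALoop tokens L e ai = pvALoop tokens L (e + 1) (ai + 1) := by
      rw [pvALoop]; simp only [dif_pos (And.intro hai he), if_pos heq]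
    rw [hstep, List.drop_eq_getElem_cons hai, List.map_cons, pvMatchEnd]
    rw [List.getD_eq_getElem L "" hai, beq_iff_eq] at heq
    simp only [dif_pos he]
    rw [if_pos (by rw [beq_iff_eq]; exact heq.symm)]
    exact ih (by omega)
  | case2 e ai h tok heq hig ih =>
    intro _
    obtain ⟨hai, he⟩ := h
    simp only [show tok = tokens.getD (e + 1) "" from rfl] at heq hig
    have hstep : pvALoop tokens L e ai = pvALoop tokens L (e + 1) ai := by
      rw [pvALoop]; simp only [dif_pos (And.intro hai he), if_neg heq, if_pos hig]
    rw [hstep, List.drop_eq_getElem_cons hai, List.map_cons, pvMatchEnd]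
    rw [List.getD_eq_getElem L "" hai] at heq
    simp only [dif_pos he]
    rw [if_neg (by rw [beq_iff_eq] at heq ⊢; exact fun hh => heq hh.symm), if_pos hig]
    have := ih (by omega)
    rw [List.drop_eq_getElem_cons hai, List.map_cons] at this
    exact this
  | case3 e ai h tok heq hig =>
    intro _
    obtain ⟨hai, he⟩ := h
    simp only [show tok = tokens.getD (e + 1) "" from rfl] at heq hig
    have hstep : pvALoop tokens L e ai = (e, ai) := by
      rw [pvALoop]; simp only [dif_pos (And.intro hai he), if_neg heq, if_neg hig]
    rw [hstep, List.drop_eq_getElem_cons hai, List.map_cons, pvMatchEnd]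
    rw [List.getD_eq_getElem L "" hai] at heq
    simp only [dif_pos he]
    rw [if_neg (by rw [beq_iff_eq] at heq ⊢; exact fun hh => heq hh.symm), if_neg hig]
    simp [if_neg (by omega : ¬ ai = L.length)]
  | case4 e ai h =>
    intro hle
    have hstep : pvALoop tokens L e ai = (e, ai) := by
      rw [pvALoop]; simp only [dif_neg h]
    rw [hstep]
    rcases Nat.lt_or_ge ai L.length with hai | hai
    · have he : ¬ e + 1 < tokens.length := fun he => h ⟨hai, he⟩
      rw [List.drop_eq_getElem_cons hai, List.map_cons, pvMatchEnd]
      simp [dif_neg he, if_neg (by omega : ¬ ai = L.length)]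
    · have : ai = L.length := le_antisymm hle hai
      subst this
      simp [pvMatchEnd]

-- the per-start step functions agree
theorem pvStep_eq (tokens L : List String) (hL : 1 ≤ L.length) (acc : List (Int × Int)) (i : Int) :
    (match pvMatchEnd tokens tokens.length i.toNat ((L.drop 1).map (fun t => PySem.Str.stripChars t pvStripped)) with
      | some e => acc ++ [(i, (e : Int))]
      | none => acc) =
    (if L.length == (pvALoop tokens L i.toNat 1).2 then acc ++ [(i, ((pvALoop tokens L i.toNat 1).1 : Int))] else acc) := by
  rw [pvMatch_eq_loop tokens L i.toNat 1 hL]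
  by_cases h : (pvALoop tokens L i.toNat 1).2 = L.length
  · simp [h]
  · simp [h, Ne.symm h]

-- B's guarded scan over the enumeration, folded over only the matching positions
theorem pvBScan (tokens : List String) (k : String) (rest : List String) :
    ∀ (l : List (Int × String)) (s : List (Int × Int)),
      l.foldl (fun acc p =>
        if p.2 == k then
          match pvMatchEnd tokens tokens.length p.1.toNat rest with
          | some e => acc ++ [(p.1, (e : Int))]
          | none => acc
        else acc) s
      = (l.filterMap (fun p => if p.2 == k then some p.1 else none)).foldl
          (fun acc i =>
            match pvMatchEnd tokens tokens.length i.toNat rest with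
            | some e => acc ++ [(i, (e : Int))]
            | none => acc) s := by
  intro l
  induction l with
  | nil => intro s; rfl
  | cons p tl ih =>
    intro s
    by_cases h : p.2 == k
    · simp only [List.foldl_cons, List.filterMap_cons, if_pos h, ih]
    · simp only [List.foldl_cons, List.filterMap_cons, if_neg h, ih]

theorem find_valid_spans_eq (passage_tokens answer_texts : List String) :
    find_valid_spans passage_tokens answer_texts = find_valid_spans_alt passage_tokens answer_texts := by
  unfold find_valid_spans find_valid_spans_alt
  simp only
  refine PySem.List.foldl_congr_mem _ _ _ _ ?_
  intro spans answer_text _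
  cases hsplit : PySem.Str.split₀ (PySem.Str.stripChars (PySem.Str.lower answer_text) pvStripped) with
  | nil => rfl
  | cons a0 tl =>
    simp only
    rw [pvBScan (passage_tokens.map pvNorm) a0 (tl.map (fun t => PySem.Str.stripChars t pvStripped))]
    have hpos : ((PySem.List.enumerate (passage_tokens.map pvNorm) 0).filterMap
        (fun p => if p.2 == a0 then some p.1 else none)) = pvPos (passage_tokens.map pvNorm) a0 := rfl
    rw [hpos]
    by_cases hc : (pvBuildWP (passage_tokens.map pvNorm)).contains a0
    · rw [if_pos hc, pvWP_getD]
      refine PySem.List.foldl_congr_mem _ _ _ _ ?_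
      intro acc i _
      have hs := pvStep_eq (passage_tokens.map pvNorm) (a0 :: tl) (by simp) acc i
      simp only [List.drop_one, List.tail_cons] at hs
      rw [hs]
    · rw [if_neg (by simpa using hc), pvWP_not_contains _ _ (by simpa using hc)]
      simp

-- ===== VERDICT (by name: the statement is the Claim_ definition above) =====
theorem find_valid_spans_spec : Claim_equal_find_valid_spans := by
  intro passage_tokens answer_texts _ _
  unfold Spec_find_valid_spans
  exact find_valid_spans_eq passage_tokens answer_texts
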